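-- pv_equiv track=rewrite | github.com/itapaullus/inf_lessons | lesson4/task1.py | calc_str
-- ===== SOURCE A (Python) =====
-- def calc_str(s: str):
--     prev_char = ''
--     result = 1
--     max_result = 0
--     for i in s:
--         if i != prev_char:
--             result += 1
--         else:
--             if result > max_result:
--                 max_result = result
--             result = 1
--         prev_char = i
--     if result > max_result:
--         max_result = result
--     return max_result
-- ===== SOURCE B (Python) =====
-- def calc_str(s: str):
--     # boundaries where s[i] == s[i-1]; answer = largest gap between consecutive
--     # boundary points, with -1 and len(s) as sentinels (includes A's +1 offset
--     # on the first segment, since A's initial prev_char '' never matches).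
--     points = [-1] + [i for i, (a, b) in enumerate(zip(s, s[1:]), 1) if a == b] + [len(s)]
--     gaps = [b - a for a, b in zip(points, points[1:])]
--     return max(gaps)
-- ===== Notes on version B (the rewrite author's own statement) =====
-- stated objective: alternative
-- what changed: A's single stateful pass with a run counter and running maximum is replaced by a two-pass decomposition: first collect the boundary indices where s[i]==s[i-1] (with -1 and len(s) sentinels), then return the maximum difference between consecutive boundary points.
import Mathlib
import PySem

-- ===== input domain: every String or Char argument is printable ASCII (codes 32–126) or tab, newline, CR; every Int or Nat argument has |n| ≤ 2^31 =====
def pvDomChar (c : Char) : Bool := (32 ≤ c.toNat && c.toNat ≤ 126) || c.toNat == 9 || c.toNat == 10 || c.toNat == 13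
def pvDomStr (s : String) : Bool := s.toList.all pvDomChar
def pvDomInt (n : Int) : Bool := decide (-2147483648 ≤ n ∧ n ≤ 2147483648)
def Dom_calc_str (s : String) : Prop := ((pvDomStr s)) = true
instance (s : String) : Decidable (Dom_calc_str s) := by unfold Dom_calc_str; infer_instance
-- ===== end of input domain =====

-- B replaces A's stateful counter scan by a two-pass decomposition: collect the
-- boundary indices where s[i] == s[i-1] (with -1 and len(s) sentinels) and take
-- the largest gap between consecutive points; objective: alternative.

-- ===== PORT A =====
-- prev_char starts as '' in Python, which never equals a 1-char string: ported as Option Char (none initially)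
def calcStrLoop (prev : Option Char) (result maxr : Int) : List Char → Int
  | [] => if result > maxr then result else maxr
  | i :: rest =>
    if some i ≠ prev then calcStrLoop (some i) (result + 1) maxr rest
    else calcStrLoop (some i) 1 (if result > maxr then result else maxr) rest

def calc_str (s : String) : Int := calcStrLoop none 1 0 s.toList

-- ===== PORT B =====
-- zip(s, s[1:]) ported as cs.zip cs.tail; Python's max over the (always
-- nonempty) gaps list = fold of max over its tail with its head as init.
def calc_str_alt (s : String) : Int :=
  let cs := s.toList
  let points : List Int :=
    -1 :: ((PySem.List.enumerate (cs.zip cs.tail) 1).filterMap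
      (fun p => if p.2.1 == p.2.2 then some p.1 else none)) ++ [(cs.length : Int)]
  let gaps := (points.zip points.tail).map (fun p => p.2 - p.1)
  match gaps with
  | [] => 0   -- unreachable: points always has ≥ 2 entries
  | g :: gs => gs.foldl max g

-- ===== PRECONDITION & SPEC =====
def Spec_calc_str (s : String) (out : Int) : Prop := out = calc_str_alt s
instance (s : String) (out : Int) : Decidable (Spec_calc_str s out) := by unfold Spec_calc_str; infer_instance

-- ===== CLAIM (what is proved, stated in full; the proofs are below) =====
def Claim_equal_calc_str : Prop := ∀ (s : String), Dom_calc_str s → Spec_calc_str s (calc_str s)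

-- ===== LEMMAS AND PROOFS =====

-- boundary indices: positions j ≥ k (k = index of the char after c) where char equals its predecessor
def bdry (c : Char) (k : Int) : List Char → List Int
  | [] => []
  | x :: l => if c == x then k :: bdry x (k + 1) l else bdry x (k + 1) l

-- running maximum of gaps between consecutive points, last point a, accumulator m
def maxGaps (a m : Int) : List Int → Int
  | [] => m
  | p :: ps => maxGaps p (max m (p - a)) ps

theorem calcStrLoop_eq_maxGaps (l : List Char) : ∀ (c : Char) (k last m : Int),
    calcStrLoop (some c) (k - last) m l = maxGaps last m (bdry c k l ++ [k + l.length]) := by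
  induction l with
  | nil =>
    intro c k last m
    simp [calcStrLoop, bdry, maxGaps]
    omega
  | cons x l ih =>
    intro c k last m
    by_cases hx : c = x
    · subst hx
      simp only [calcStrLoop, bdry, beq_self_eq_true, if_true, ne_eq,
        not_true_eq_false, if_false, List.length_cons, List.cons_append, maxGaps]
      have h1 : (1 : Int) = (k + 1) - k := by ring
      have h2 : (if k - last > m then k - last else m) = max m (k - last) := by omega
      rw [h1, h2, ih c (k + 1) k (max m (k - last))]
      have : k + ((l.length : Int) + 1) = (k + 1) + l.length := by ring
      push_cast
      ring_nf
    · have hb : (c == x) = false := by simp [hx]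
      simp only [calcStrLoop, bdry, hb, ne_eq, Option.some.injEq, List.length_cons]
      rw [if_pos (by simpa using fun h => hx h.symm)]
      have h1 : k - last + 1 = (k + 1) - last := by ring
      rw [h1, ih x (k + 1) last m]
      push_cast
      ring_nf

theorem enum_bdry (l : List Char) : ∀ (x : Char) (k : Int),
    (PySem.List.enumerate ((x :: l).zip l) k).filterMap
      (fun p => if p.2.1 == p.2.2 then some p.1 else none) = bdry x k l := by
  induction l with
  | nil => intro x k; simp [bdry, PySem.List.enumerate_nil]
  | cons y l ih =>
    intro x k
    simp only [List.zip_cons_cons, PySem.List.enumerate_cons, List.filterMap_cons, bdry]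
    rw [ih y (k + 1)]
    cases hxy : (x == y)
    · simp
    · simp [hxy]

theorem foldl_max_maxGaps (ps : List Int) : ∀ (a g : Int),
    (((a :: ps).zip ps).map (fun p : Int × Int => p.2 - p.1)).foldl max g = maxGaps a g ps := by
  induction ps with
  | nil => intro a g; simp [maxGaps]
  | cons p ps ih =>
    intro a g
    simp only [List.zip_cons_cons, List.map_cons, List.foldl_cons, maxGaps]
    exact ih p (max g (p - a))

theorem bdry_mem_ge (l : List Char) : ∀ (c : Char) (k j : Int), j ∈ bdry c k l → k ≤ j := by
  induction l with
  | nil => intro c k j h; simp [bdry] at h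
  | cons x l ih =>
    intro c k j h
    simp only [bdry] at h
    split at h
    · rcases List.mem_cons.mp h with rfl | h'
      · omega
      · have := ih x (k + 1) j h'; omega
    · have := ih x (k + 1) j h; omega

theorem calc_str_eq (s : String) : calc_str s = calc_str_alt s := by
  cases h : s.toList with
  | nil =>
    simp only [calc_str, calc_str_alt, h]
    decide
  | cons x l =>
    simp only [calc_str, calc_str_alt, h]
    -- A side: first iteration always takes the ≠ branch
    rw [show calcStrLoop none 1 0 (x :: l) = calcStrLoop (some x) 2 0 l from by
      simp [calcStrLoop]]
    have h2 : (2 : Int) = 1 - (-1) := by ring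
    rw [h2, calcStrLoop_eq_maxGaps l x 1 (-1) 0]
    -- B side
    simp only [List.tail_cons, enum_bdry l x 1, List.length_cons]
    have hn : (1 : Int) + (l.length : Int) = ((l.length + 1 : Nat) : Int) := by push_cast; ring
    rw [hn]
    set n : Int := ((l.length + 1 : Nat) : Int) with hndef
    simp only [List.cons_append, List.tail_cons]
    -- the tail of the points list is nonempty; name its head
    rcases hps : bdry x 1 l ++ [n] with _ | ⟨p, ps'⟩
    · simp at hps
    · have hp1 : (1 : Int) ≤ p := by
        rcases hb : bdry x 1 l with _ | ⟨b, bs⟩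
        · rw [hb] at hps; simp at hps
          omega
        · rw [hb] at hps
          simp only [List.cons_append, List.cons.injEq] at hps
          have := bdry_mem_ge l x 1 b (by rw [hb]; exact List.mem_cons_self ..)
          omega
      have hmax : max 0 (p - -1) = p - -1 := by omega
      simp only [maxGaps, hmax]
      rw [← foldl_max_maxGaps ps' p (p - -1)]
      simp

-- ===== VERDICT (by name: the statement is the Claim_ definition above) =====
theorem calc_str_spec : Claim_equal_calc_str := by
  intro s _
  unfold Spec_calc_str
  exact calc_str_eq s
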